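-- pv_equiv track=rewrite | github.com/sst-tiffany/programming_tasks | yandex-bs-entrance1-2019/H/solution.py | ddos_ips
-- ===== SOURCE A (Python) =====
-- from collections import defaultdict
--
-- def ddos_ips(ip_list, window, critical):
--     sample, rest = ip_list[:window], ip_list[window:]
--     ddos_ips = find_suspisious(sample, critical)
--
--     while rest:
--         sample = sample[1:] + [rest.pop(0)]
--         ddos_ips = ddos_ips | find_suspisious(sample, critical)
--
--     ddos_ips = sorted(list(ddos_ips))
--     return ddos_ips
--
-- def find_suspisious(sample, critical):
--     ip_frequencies = defaultdict(lambda: 0)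
--
--     for ip in sample:
--         ip_frequencies[ip] += 1
--
--     return set([ip for ip, frequency in ip_frequencies.items() if frequency >= critical])
-- ===== SOURCE B (Python) =====
-- from collections import Counter
--
-- def ddos_ips(ip_list, window, critical):
--     # Incremental sliding-window counter instead of recounting every window.
--     if critical <= 1:
--         # every element lies in some (nonempty) window, so qualifies trivially
--         return sorted(set(ip_list))
--     s = len(ip_list[:window])
--     if s == 0:
--         # only empty/singleton windows exist; no frequency can reach critical >= 2
--         return []
--     counts = Counter(ip_list[:s])
--     result = {ip for ip, c in counts.items() if c >= critical}
--     for new, old in zip(ip_list[s:], ip_list):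
--         counts[new] += 1
--         counts[old] -= 1
--         if counts[new] >= critical:
--             result.add(new)
--     return sorted(result)
-- ===== Notes on version B (the rewrite author's own statement) =====
-- stated objective: faster
-- what changed: Replaces A's per-shift full recount (a fresh frequency dict built for every shifted window) by a single incremental sliding-window counter updated with the entering/leaving element, with direct answers for the trivial cases critical <= 1 (every element qualifies) and an empty initial window (nothing can qualify).
import Mathlib
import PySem

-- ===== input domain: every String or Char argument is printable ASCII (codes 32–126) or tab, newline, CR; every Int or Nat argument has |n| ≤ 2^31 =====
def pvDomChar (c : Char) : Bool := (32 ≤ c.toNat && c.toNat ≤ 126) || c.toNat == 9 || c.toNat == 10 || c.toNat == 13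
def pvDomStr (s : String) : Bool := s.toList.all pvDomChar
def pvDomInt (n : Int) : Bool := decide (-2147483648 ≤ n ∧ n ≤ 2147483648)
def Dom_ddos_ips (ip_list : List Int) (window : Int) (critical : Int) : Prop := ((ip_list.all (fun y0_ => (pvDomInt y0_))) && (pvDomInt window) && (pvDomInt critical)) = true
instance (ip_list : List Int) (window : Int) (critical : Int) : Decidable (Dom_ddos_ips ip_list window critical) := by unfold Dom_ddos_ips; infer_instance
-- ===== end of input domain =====

-- B replaces A's per-shift full recount of each window with one incremental sliding
-- counter (plus direct answers for critical ≤ 1 and empty initial windows): asymptotically faster.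

-- ===== PORT A =====
-- find_suspisious(sample, critical)
def pvFindSuspisious (sample : List Int) (critical : Int) : PySem.Set Int :=
  let ip_frequencies : PySem.Dict Int Int :=
    sample.foldl (fun d ip => d.modify ip 0 (fun v => v + 1)) PySem.Dict.empty
  PySem.Set.ofList
    ((ip_frequencies.items.filter (fun p => decide (critical ≤ p.2))).map (fun p => p.1))

-- the 'while rest:' loop of A (rest.pop(0) consumes rest head by head)
def pvDdosLoop (sample rest : List Int) (acc : PySem.Set Int) (critical : Int) : PySem.Set Int :=
  match rest with
  | [] => acc
  | r :: rest' =>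
      let sample' := PySem.List.slice sample (some 1) none ++ [r]
      pvDdosLoop sample' rest' (PySem.Set.union acc (pvFindSuspisious sample' critical)) critical

def ddos_ips (ip_list : List Int) (window : Int) (critical : Int) : List Int :=
  let sample := PySem.List.slice ip_list none (some window)
  let rest := PySem.List.slice ip_list (some window) none
  let dd := pvDdosLoop sample rest (pvFindSuspisious sample critical) critical
  PySem.List.sorted dd (fun x => x) false

-- ===== PORT B =====
-- body of B's 'for new, old in zip(...)' loop
def pvSlideStep (critical : Int) (st : PySem.Dict Int Int × PySem.Set Int) (p : Int × Int) :
    PySem.Dict Int Int × PySem.Set Int :=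
  let counts := (st.1.modify p.1 0 (fun v => v + 1)).modify p.2 0 (fun v => v - 1)
  let result := if critical ≤ counts.getD p.1 0 then PySem.Set.add st.2 p.1 else st.2
  (counts, result)

def ddos_ips_alt (ip_list : List Int) (window : Int) (critical : Int) : List Int :=
  if critical ≤ 1 then
    PySem.List.sorted (PySem.Set.ofList ip_list) (fun x => x) false
  else
    let s := (PySem.List.slice ip_list none (some window)).length
    if s = 0 then []
    else
      let counts : PySem.Dict Int Int :=
        PySem.Dict.counter (PySem.List.slice ip_list none (some (s : Int)))
      let result : PySem.Set Int :=
        PySem.Set.ofList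
          ((counts.items.filter (fun p => decide (critical ≤ p.2))).map (fun p => p.1))
      let st := ((PySem.List.slice ip_list (some (s : Int)) none).zip ip_list).foldl
                  (pvSlideStep critical) (counts, result)
      PySem.List.sorted st.2 (fun x => x) false

-- ===== PRECONDITION & SPEC =====
def Spec_ddos_ips (ip_list : List Int) (window : Int) (critical : Int) (out : List Int) : Prop := out = ddos_ips_alt ip_list window critical
instance (ip_list : List Int) (window : Int) (critical : Int) (out : List Int) : Decidable (Spec_ddos_ips ip_list window critical out) := by unfold Spec_ddos_ips; infer_instance

-- ===== CLAIM (what is proved, stated in full; the proofs are below) =====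
def Claim_equal_ddos_ips : Prop := ∀ (ip_list : List Int) (window : Int) (critical : Int), Dom_ddos_ips ip_list window critical → Spec_ddos_ips ip_list window critical (ddos_ips ip_list window critical)

-- ===== LEMMAS AND PROOFS =====

-- x qualifies in window `sample`: it occurs there with frequency ≥ c
def pvQual0 (c x : Int) (sample : List Int) : Prop :=
  x ∈ sample ∧ c ≤ (sample.count x : Int)

-- x qualifies in some later window of A's slide (A records every qualifying ip of each window)
def pvSlideA (c x : Int) (sample rest : List Int) : Prop :=
  match rest with
  | [] => False
  | r :: rest' => pvQual0 c x (sample.tail ++ [r]) ∨ pvSlideA c x (sample.tail ++ [r]) rest'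

-- x qualifies in some later window of B's slide (B only records the entering ip)
def pvSlideB (c x : Int) (sample rest : List Int) : Prop :=
  match rest with
  | [] => False
  | r :: rest' =>
      (x = r ∧ c ≤ (((sample.tail ++ [r]).count r : Nat) : Int)) ∨
      pvSlideB c x (sample.tail ++ [r]) rest'

theorem pv_mem_critItems (sample : List Int) (c x : Int) :
    x ∈ PySem.Set.ofList
        (((PySem.Dict.counter sample : PySem.Dict Int Int).items.filter
            (fun p => decide (c ≤ p.2))).map (fun p => p.1)) ↔ pvQual0 c x sample := by
  simp [PySem.Dict.items_counter, PySem.Set.mem_ofList, List.mem_filter, List.mem_map, pvQual0]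

theorem pv_susp_eq (sample : List Int) (c : Int) :
    pvFindSuspisious sample c =
      PySem.Set.ofList
        (((PySem.Dict.counter sample : PySem.Dict Int Int).items.filter
            (fun p => decide (c ≤ p.2))).map (fun p => p.1)) := by
  rw [PySem.Dict.counter_eq_foldl]; rfl

theorem pv_mem_susp (sample : List Int) (c x : Int) :
    x ∈ pvFindSuspisious sample c ↔ pvQual0 c x sample := by
  rw [pv_susp_eq]; exact pv_mem_critItems sample c x

theorem pv_loopA_mem (c x : Int) :
    ∀ (rest sample : List Int) (acc : PySem.Set Int),
      (x ∈ pvDdosLoop sample rest acc c ↔ x ∈ acc ∨ pvSlideA c x sample rest) := by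
  intro rest
  induction rest with
  | nil => intro sample acc; simp [pvDdosLoop, pvSlideA]
  | cons r rest' ih =>
    intro sample acc
    rw [pvDdosLoop, pvSlideA]
    simp only [PySem.List.slice_from_one]
    rw [ih]
    simp [PySem.Set.mem_union, pv_mem_susp]
    tauto

theorem pv_loopA_nodup (c : Int) :
    ∀ (rest sample : List Int) (acc : PySem.Set Int),
      acc.Nodup → (pvDdosLoop sample rest acc c).Nodup := by
  intro rest
  induction rest with
  | nil => intro sample acc h; exact h
  | cons r rest' ih =>
    intro sample acc h
    rw [pvDdosLoop]
    exact ih _ _ (PySem.Set.nodup_union _ _ h)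

theorem pv_slideA_sub (c x : Int) :
    ∀ (rest sample : List Int), pvSlideA c x sample rest → x ∈ sample ∨ x ∈ rest := by
  intro rest
  induction rest with
  | nil => intro sample h; exact absurd h (by simp [pvSlideA])
  | cons r rest' ih =>
    intro sample h
    rw [pvSlideA] at h
    rcases h with ⟨hm, _⟩ | h
    · rcases List.mem_append.mp hm with h | h
      · exact Or.inl (List.mem_of_mem_tail h)
      · simp at h; subst h; simp
    · rcases ih _ h with h | h
      · rcases List.mem_append.mp h with h | h
        · exact Or.inl (List.mem_of_mem_tail h)
        · simp at h; subst h; simp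
      · right; simp [h]

theorem pv_slideA_of_mem_rest (c x : Int) (hc : c ≤ 1) :
    ∀ (rest sample : List Int), x ∈ rest → pvSlideA c x sample rest := by
  intro rest
  induction rest with
  | nil => intro sample h; simp at h
  | cons r rest' ih =>
    intro sample h
    rw [pvSlideA]
    rcases List.mem_cons.mp h with rfl | h
    · left
      constructor
      · simp
      · have : 1 ≤ (sample.tail ++ [x]).count x := by
          simp [List.count_append]
        omega
    · exact Or.inr (ih _ h)

theorem pv_slideA_small (c x : Int) (hc : 2 ≤ c) :
    ∀ (rest sample : List Int), sample.length ≤ 1 → ¬ pvSlideA c x sample rest := by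
  intro rest
  induction rest with
  | nil => intro sample _ h; exact h
  | cons r rest' ih =>
    intro sample hlen h
    have htail : sample.tail = [] := by
      cases sample with
      | nil => rfl
      | cons a t => simp at hlen; exact hlen
    rw [pvSlideA, htail] at h
    rcases h with ⟨_, hcnt⟩ | h
    · have : ([r] : List Int).count x ≤ 1 := List.count_le_length
      simp at hcnt
      omega
    · exact ih ([r]) (by simp) h

theorem pv_count_tail_le (x : Int) (sample : List Int) :
    sample.tail.count x ≤ sample.count x := by
  cases sample with
  | nil => simp
  | cons a t => simp [List.count_cons]

theorem pv_qual_step (c x r : Int) (sample : List Int) :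
    pvQual0 c x sample ∨ pvQual0 c x (sample.tail ++ [r]) ↔
      pvQual0 c x sample ∨ (x = r ∧ c ≤ (((sample.tail ++ [r]).count r : Nat) : Int)) := by
  constructor
  · rintro (h | ⟨hm, hc⟩)
    · exact Or.inl h
    · by_cases hxr : x = r
      · subst hxr; exact Or.inr ⟨rfl, hc⟩
      · left
        have hmem : x ∈ sample := by
          rcases List.mem_append.mp hm with h | h
          · exact List.mem_of_mem_tail h
          · simp at h; exact absurd h hxr
        have hcnt : (sample.tail ++ [r]).count x ≤ sample.count x := by
          rw [List.count_append,
            show List.count x [r] = 0 from List.count_eq_zero_of_not_mem (by simp [hxr])]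
          simpa using pv_count_tail_le x sample
        exact ⟨hmem, by exact_mod_cast le_trans hc (by exact_mod_cast hcnt)⟩
  · rintro (h | ⟨rfl, hc⟩)
    · exact Or.inl h
    · exact Or.inr ⟨by simp, hc⟩

theorem pv_slide_iff (c x : Int) :
    ∀ (rest sample : List Int),
      (pvQual0 c x sample ∨ pvSlideA c x sample rest) ↔
      (pvQual0 c x sample ∨ pvSlideB c x sample rest) := by
  intro rest
  induction rest with
  | nil => intro sample; rw [pvSlideA, pvSlideB]
  | cons r rest' ih =>
    intro sample
    rw [pvSlideA, pvSlideB]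
    have h1 := ih (sample.tail ++ [r])
    have h2 := pv_qual_step c x r sample
    tauto

theorem pv_loopB_mem (c x : Int) :
    ∀ (rest sample : List Int) (counts : PySem.Dict Int Int) (res : PySem.Set Int),
      sample ≠ [] →
      (∀ v, counts.getD v 0 = (sample.count v : Int)) →
      (x ∈ ((rest.zip (sample ++ rest)).foldl (pvSlideStep c) (counts, res)).2 ↔
        x ∈ res ∨ pvSlideB c x sample rest) := by
  intro rest
  induction rest with
  | nil => intro sample counts res _ _; simp [pvSlideB]
  | cons r rest' ih =>
    intro sample counts res hne hcount
    obtain ⟨o, t, rfl⟩ : ∃ o t, sample = o :: t := by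
      cases sample with
      | nil => exact absurd rfl hne
      | cons a b => exact ⟨a, b, rfl⟩
    have hzip : ((r :: rest').zip ((o :: t) ++ r :: rest')) =
        (r, o) :: (rest'.zip ((t ++ [r]) ++ rest')) := by
      simp [List.zip]
    rw [hzip, List.foldl_cons]
    -- the counter after one step counts the shifted window  t ++ [r]
    have hcount' : ∀ v,
        (((counts.modify r 0 (fun v => v + 1)).modify o 0 (fun v => v - 1)).getD v 0) =
          (((t ++ [r]).count v : Nat) : Int) := by
      intro v
      simp only [PySem.Dict.getD_modify, hcount, List.count_cons, List.count_append]
      split_ifs with hvo hvr <;> simp_all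
    have hstep : (pvSlideStep c (counts, res) (r, o)) =
        (((counts.modify r 0 (fun v => v + 1)).modify o 0 (fun v => v - 1)),
          if c ≤ (((t ++ [r]).count r : Nat) : Int) then PySem.Set.add res r else res) := by
      simp [pvSlideStep, hcount' r]
    rw [hstep]
    rw [ih (t ++ [r]) _ _ (by simp) hcount']
    rw [pvSlideB]
    simp only [List.tail_cons]
    have hcnt : (((t ++ [r]).count r : Nat) : Int) = ((t.count r : Nat) : Int) + 1 := by
      simp [List.count_append]
    rw [hcnt]
    split_ifs with hcr
    · simp only [PySem.Set.mem_add]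
      tauto
    · tauto

theorem pv_loopB_nodup (c : Int) :
    ∀ (pairs : List (Int × Int)) (st : PySem.Dict Int Int × PySem.Set Int),
      st.2.Nodup → ((pairs.foldl (pvSlideStep c) st).2).Nodup := by
  intro pairs
  induction pairs with
  | nil => intro st h; exact h
  | cons p ps ih =>
    intro st h
    rw [List.foldl_cons]
    apply ih
    simp only [pvSlideStep]
    split_ifs with hc
    · exact PySem.Set.nodup_add _ _ h
    · exact h

theorem pv_sorted_eq_of_mem_iff (S T : List Int) (hS : S.Nodup) (hT : T.Nodup)
    (h : ∀ x, x ∈ S ↔ x ∈ T) :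
    PySem.List.sorted S (fun x => x) false = PySem.List.sorted T (fun x => x) false := by
  rw [PySem.List.sorted_id_eq_sorted_id_iff_perm]
  exact (List.perm_ext_iff_of_nodup hS hT).mpr h

theorem pv_slice_none_some (xs : List Int) (b : Int) :
    PySem.List.slice xs none (some b) = xs.take (PySem.List.clampIdx xs.length b) := by
  simp [PySem.List.slice]

-- ===== VERDICT (by name: the statement is the Claim_ definition above) =====
theorem ddos_ips_spec : Claim_equal_ddos_ips := by
  intro l window c _
  unfold Spec_ddos_ips ddos_ips ddos_ips_alt
  have hfr : PySem.List.slice l none (some window)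
      = l.take (PySem.List.clampIdx l.length window) := pv_slice_none_some l window
  have hre : PySem.List.slice l (some window)
      = l.drop (PySem.List.clampIdx l.length window) := PySem.List.slice_some_none l window
  set k := PySem.List.clampIdx l.length window with hkdef
  have hkle : k ≤ l.length := PySem.List.clampIdx_le _ _
  have hinitA_nodup : (pvFindSuspisious (l.take k) c).Nodup := by
    rw [pv_susp_eq]; exact PySem.Set.nodup_ofList _
  by_cases hc1 : c ≤ 1
  · rw [if_pos hc1]
    simp only [hfr, hre]
    apply pv_sorted_eq_of_mem_iff
    · exact pv_loopA_nodup c _ _ _ hinitA_nodup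
    · exact PySem.Set.nodup_ofList l
    · intro x
      rw [pv_loopA_mem, pv_mem_susp, PySem.Set.mem_ofList]
      constructor
      · rintro (⟨hm, _⟩ | h)
        · exact List.mem_of_mem_take hm
        · rcases pv_slideA_sub c x _ _ h with h | h
          · exact List.mem_of_mem_take h
          · exact List.mem_of_mem_drop h
      · intro hx
        have hx' : x ∈ l.take k ++ l.drop k := by rw [List.take_append_drop]; exact hx
        rcases List.mem_append.mp hx' with h | h
        · left
          refine ⟨h, ?_⟩
          have h1 : 0 < (l.take k).count x := List.count_pos_iff.mpr h
          omega
        · exact Or.inr (pv_slideA_of_mem_rest c x hc1 _ _ h)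
  · rw [if_neg hc1]
    simp only [hfr, hre, List.length_take, Nat.min_eq_left hkle]
    by_cases hk0 : k = 0
    · rw [if_pos hk0]
      rw [PySem.List.sorted_eq_nil_iff]
      refine List.eq_nil_iff_forall_not_mem.mpr (fun x hx => ?_)
      rw [pv_loopA_mem, pv_mem_susp] at hx
      rcases hx with ⟨hm, _⟩ | h
      · rw [hk0] at hm; simp at hm
      · exact pv_slideA_small c x (by omega) _ _ (by simp [hk0]) h
    · rw [if_neg hk0]
      have htk : l.take k ≠ [] := by
        intro hnil
        rcases List.take_eq_nil_iff.mp hnil with h | h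
        · exact hk0 h
        · rw [h] at hkle; simp at hkle; omega
      simp only [PySem.List.slice_to_natCast, PySem.List.slice_from_natCast]
      apply pv_sorted_eq_of_mem_iff
      · exact pv_loopA_nodup c _ _ _ hinitA_nodup
      · exact pv_loopB_nodup c _ _ (PySem.Set.nodup_ofList _)
      · intro x
        rw [pv_loopA_mem, pv_mem_susp]
        have hzipeq : (l.drop k).zip l = (l.drop k).zip (l.take k ++ l.drop k) := by
          rw [List.take_append_drop]
        rw [hzipeq,
          pv_loopB_mem c x (l.drop k) (l.take k) _ _ htk
            (fun v => PySem.Dict.getD_counter (l.take k) v),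
          pv_mem_critItems]
        exact pv_slide_iff c x (l.drop k) (l.take k)
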